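-- pv_equiv track=rewrite | github.com/PoneyUHC/ProvScopeApp | src/common/src/lcs/lcs.py | event_traces_to_indexed_traces
-- ===== SOURCE A (Python) =====
-- def event_traces_to_indexed_traces(traces):
--
--     indexed_traces = []
--     current_indexed_trace = []
--     index_map = {}
--     current_index = 0
--
--     for trace in traces:
--         for event in trace:
--             if event in index_map.keys():
--                 current_indexed_trace.append(index_map[event])
--             else:
--                 index_map[event] = current_index
--                 current_indexed_trace.append(current_index)
--                 current_index += 1
--
--         indexed_traces.append(current_indexed_trace)
--         current_indexed_trace = []
--
--     return indexed_traces, current_index, index_map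
-- ===== SOURCE B (Python) =====
-- def event_traces_to_indexed_traces(traces):
--     index_map = {}
--     for trace in traces:
--         for event in trace:
--             index_map.setdefault(event, len(index_map))
--     indexed_traces = [[index_map[e] for e in trace] for trace in traces]
--     return indexed_traces, len(index_map), index_map
-- ===== Notes on version B (the rewrite author's own statement) =====
-- stated objective: simpler
-- what changed: B separates the work into two plain passes: one setdefault pass that builds the event->index map (so len(index_map) is the count), then a comprehension that translates every trace by pure lookup, replacing A's single interleaved loop that threads an explicit counter and a per-trace accumulator.
import Mathlib
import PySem

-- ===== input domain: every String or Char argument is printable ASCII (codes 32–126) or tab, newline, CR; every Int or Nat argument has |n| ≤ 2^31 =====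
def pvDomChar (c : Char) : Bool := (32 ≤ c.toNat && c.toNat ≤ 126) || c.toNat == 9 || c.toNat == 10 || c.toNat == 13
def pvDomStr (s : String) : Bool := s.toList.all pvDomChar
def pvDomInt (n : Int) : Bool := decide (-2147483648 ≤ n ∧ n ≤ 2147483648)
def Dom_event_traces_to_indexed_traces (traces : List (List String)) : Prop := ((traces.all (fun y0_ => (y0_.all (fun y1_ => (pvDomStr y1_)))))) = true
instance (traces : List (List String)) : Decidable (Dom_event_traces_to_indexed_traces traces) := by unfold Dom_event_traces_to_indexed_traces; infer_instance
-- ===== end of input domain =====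

-- B replaces A's single interleaved loop (explicit counter + per-trace accumulator) by two
-- plain passes: a setdefault pass building the map, then a lookup comprehension (objective: simpler).

-- ===== PORT A =====
-- inner loop body of A: one event step on (current_indexed_trace, index_map, current_index)
def aInner (s : List Int × PySem.Dict String Int × Int) (event : String) :
    List Int × PySem.Dict String Int × Int :=
  match s with
  | (cur, m, ci) =>
    if m.contains event then (cur ++ [m.getD event 0], m, ci)
    else (cur ++ [ci], m.insert event ci, ci + 1)

-- outer loop body of A: process one trace, append the finished indexed trace
def aOuter (st : List (List Int) × PySem.Dict String Int × Int) (trace : List String) :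
    List (List Int) × PySem.Dict String Int × Int :=
  match st with
  | (acc, m, ci) =>
    let inner := trace.foldl aInner ([], m, ci)
    (acc ++ [inner.1], inner.2.1, inner.2.2)

def event_traces_to_indexed_traces (traces : List (List String)) :
    List (List Int) × Int × (List (String × Int)) :=
  let st := traces.foldl aOuter ([], PySem.Dict.empty, 0)
  (st.1, st.2.2, st.2.1.items)

-- ===== PORT B =====
-- build pass over one trace: index_map.setdefault(event, len(index_map))
def bBuild (m : PySem.Dict String Int) (trace : List String) : PySem.Dict String Int :=
  trace.foldl (fun m e => m.setdefault e (m.size : Int)) m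

def event_traces_to_indexed_traces_alt (traces : List (List String)) :
    List (List Int) × Int × (List (String × Int)) :=
  let m := traces.foldl bBuild PySem.Dict.empty
  (traces.map (fun t => t.map (fun e => m.getD e 0)), (m.size : Int), m.items)

-- ===== PRECONDITION & SPEC =====
def Spec_event_traces_to_indexed_traces (traces : List (List String)) (out : List (List Int) × Int × (List (String × Int))) : Prop := out = event_traces_to_indexed_traces_alt traces
instance (traces : List (List String)) (out : List (List Int) × Int × (List (String × Int))) : Decidable (Spec_event_traces_to_indexed_traces traces out) := by unfold Spec_event_traces_to_indexed_traces; infer_instance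

-- ===== CLAIM (what is proved, stated in full; the proofs are below) =====
def Claim_equal_event_traces_to_indexed_traces : Prop := ∀ (traces : List (List String)), Dom_event_traces_to_indexed_traces traces → Spec_event_traces_to_indexed_traces traces (event_traces_to_indexed_traces traces)

-- ===== LEMMAS AND PROOFS =====

-- m' preserves every binding of m (dict entries are never overwritten in either program)
def DExt (m m' : PySem.Dict String Int) : Prop :=
  ∀ k v, m.get? k = some v → m'.get? k = some v

lemma dext_refl (m : PySem.Dict String Int) : DExt m m := fun _ _ h => h

lemma dext_trans {m₁ m₂ m₃ : PySem.Dict String Int} (h₁ : DExt m₁ m₂) (h₂ : DExt m₂ m₃) :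
    DExt m₁ m₃ := fun k v h => h₂ k v (h₁ k v h)

lemma dext_setdefault (m : PySem.Dict String Int) (k : String) (v : Int) :
    DExt m (m.setdefault k v) := by
  intro k' v' h
  by_cases hc : m.contains k = true
  · rw [PySem.Dict.setdefault_of_contains m v hc]; exact h
  · rw [PySem.Dict.setdefault_of_not_contains m v (by simpa using hc)]
    rcases eq_or_ne k' k with rfl | hne
    · exfalso
      have hcs : m.contains k' = (m.get? k').isSome := PySem.Dict.contains_eq_isSome_get? m k'
      rw [h] at hcs; simp at hcs; exact hc hcs
    · rw [PySem.Dict.get?_insert_of_ne m v hne]; exact h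

lemma dext_bBuild (t : List String) : ∀ m, DExt m (bBuild m t) := by
  induction t with
  | nil => intro m; exact dext_refl m
  | cons e rest ih =>
    intro m
    exact dext_trans (dext_setdefault m e (m.size : Int)) (ih _)

lemma dext_foldl_bBuild (ts : List (List String)) : ∀ m, DExt m (ts.foldl bBuild m) := by
  induction ts with
  | nil => intro m; exact dext_refl m
  | cons t rest ih => intro m; exact dext_trans (dext_bBuild t m) (ih _)

lemma getD_of_dext {m m' : PySem.Dict String Int} (h : DExt m m') {k : String}
    (hc : m.contains k = true) : m'.getD k 0 = m.getD k 0 := by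
  have hs : (m.get? k).isSome := by
    rw [← PySem.Dict.contains_eq_isSome_get?]; exact hc
  rcases Option.isSome_iff_exists.mp hs with ⟨v, hv⟩
  rw [PySem.Dict.getD_of_get?_eq_some m 0 hv, PySem.Dict.getD_of_get?_eq_some m' 0 (h k v hv)]

lemma contains_bBuild (t : List String) :
    ∀ m (e : String), e ∈ t → (bBuild m t).contains e = true := by
  induction t with
  | nil => intro _ _ h; cases h
  | cons x rest ih =>
    intro m e he
    rcases List.mem_cons.mp he with rfl | he'
    · by_cases hmem : e ∈ rest
      · exact ih _ e hmem
      · have hget : (m.setdefault e (m.size : Int)).get? e = some ((m.get? e).getD (m.size : Int)) :=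
          PySem.Dict.get?_setdefault_self m e (m.size : Int)
        have hget' := dext_bBuild rest (m.setdefault e (m.size : Int)) e _ hget
        have : bBuild m (e :: rest) = bBuild (m.setdefault e (m.size : Int)) rest := rfl
        rw [this, PySem.Dict.contains_eq_isSome_get?, hget']; rfl
    · exact ih _ e he'

lemma nodup_bBuild (t : List String) : ∀ m, m.keys.Nodup → (bBuild m t).keys.Nodup := by
  induction t with
  | nil => intro m h; exact h
  | cons e rest ih =>
    intro m h
    have hstep : bBuild m (e :: rest) = bBuild (m.setdefault e (m.size : Int)) rest := rfl
    rw [hstep]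
    apply ih
    by_cases hc : m.contains e = true
    · rw [PySem.Dict.setdefault_of_contains m _ hc]; exact h
    · rw [PySem.Dict.setdefault_of_not_contains m _ (by simpa using hc)]
      exact PySem.Dict.nodup_keys_insert m e _ h

-- inner loop of A over one trace = B's build pass plus lookups in the resulting map
lemma inner_eq (t : List String) : ∀ (acc : List Int) (m : PySem.Dict String Int),
    m.keys.Nodup →
    t.foldl aInner (acc, m, (m.size : Int)) =
      (acc ++ t.map (fun e => (bBuild m t).getD e 0), bBuild m t, ((bBuild m t).size : Int)) := by
  induction t with
  | nil => intro acc m _; simp [bBuild]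
  | cons e rest ih =>
    intro acc m hnd
    have hstep : List.foldl aInner (acc, m, (m.size : Int)) (e :: rest)
        = List.foldl aInner (aInner (acc, m, (m.size : Int)) e) rest := rfl
    rw [hstep]
    by_cases hc : m.contains e = true
    · have hb : bBuild m (e :: rest) = bBuild m rest := by
        have h0 : bBuild m (e :: rest) = bBuild (m.setdefault e (m.size : Int)) rest := rfl
        rw [h0, PySem.Dict.setdefault_of_contains m _ hc]
      have hhead : (bBuild m rest).getD e 0 = m.getD e 0 :=
        getD_of_dext (dext_bBuild rest m) hc
      have ha : aInner (acc, m, (m.size : Int)) e = (acc ++ [m.getD e 0], m, (m.size : Int)) := by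
        simp [aInner, hc]
      rw [ha, ih (acc ++ [m.getD e 0]) m hnd, hb]
      simp [hhead]
    · have hc' : m.contains e = false := by simpa using hc
      have hb : bBuild m (e :: rest) = bBuild (m.insert e (m.size : Int)) rest := by
        have h0 : bBuild m (e :: rest) = bBuild (m.setdefault e (m.size : Int)) rest := rfl
        rw [h0, PySem.Dict.setdefault_of_not_contains m _ hc']
      have hsz : ((m.insert e (m.size : Int)).size : Int) = (m.size : Int) + 1 := by
        rw [PySem.Dict.size_insert m e (m.size : Int)]
        simp [hc']
      have hhead : (bBuild (m.insert e (m.size : Int)) rest).getD e 0 = (m.size : Int) := by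
        rw [getD_of_dext (dext_bBuild rest _) (PySem.Dict.contains_insert_self m e _)]
        exact PySem.Dict.getD_insert_self m e _ 0
      have ha : aInner (acc, m, (m.size : Int)) e
          = (acc ++ [(m.size : Int)], m.insert e (m.size : Int), ((m.insert e (m.size : Int)).size : Int)) := by
        simp [aInner, hc', hsz]
      rw [ha, ih (acc ++ [(m.size : Int)]) _ (PySem.Dict.nodup_keys_insert m e _ hnd), hb]
      simp [hhead]

-- outer loop of A = B's two passes, from any well-formed state
lemma outer_eq (ts : List (List String)) : ∀ (acc : List (List Int)) (m : PySem.Dict String Int),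
    m.keys.Nodup →
    ts.foldl aOuter (acc, m, (m.size : Int)) =
      (acc ++ ts.map (fun t => t.map (fun e => (ts.foldl bBuild m).getD e 0)),
       ts.foldl bBuild m, ((ts.foldl bBuild m).size : Int)) := by
  induction ts with
  | nil => intro acc m _; simp
  | cons t rest ih =>
    intro acc m hnd
    simp only [List.foldl_cons, aOuter]
    rw [inner_eq t [] m hnd]
    simp only [List.nil_append]
    rw [ih (acc ++ [t.map (fun e => (bBuild m t).getD e 0)]) (bBuild m t) (nodup_bBuild t m hnd)]
    have hmap : t.map (fun e => (bBuild m t).getD e 0)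
        = t.map (fun e => (rest.foldl bBuild (bBuild m t)).getD e 0) := by
      apply List.map_congr_left
      intro e he
      exact (getD_of_dext (dext_foldl_bBuild rest (bBuild m t)) (contains_bBuild t m e he)).symm
    simp [hmap]

-- ===== VERDICT (by name: the statement is the Claim_ definition above) =====
theorem event_traces_to_indexed_traces_spec : Claim_equal_event_traces_to_indexed_traces := by
  intro traces _
  unfold Spec_event_traces_to_indexed_traces event_traces_to_indexed_traces event_traces_to_indexed_traces_alt
  have h := outer_eq traces [] PySem.Dict.empty PySem.Dict.nodup_keys_empty
  simp only [PySem.Dict.size_empty, Nat.cast_zero, List.nil_append] at h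
  rw [h]
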